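-- pv_equiv track=rewrite | github.com/Divyalucky8050/divya | CODE1.py | max_score_subarray
-- ===== SOURCE A (Python) =====
-- def max_score_subarray(N, K, A):
--     # Step 2: Create the score array S
--     S = [(i + 1) * A[i] for i in range(N)]  # Calculate scores based on 1-based index
--
--     # Step 3: Sliding window to find the max score for subarrays of size K
--     max_score = float('-inf')
--
--     # Calculate the score for the first window
--     current_score = sum(S[:K])
--     max_score = current_score
--
--     # Slide the window
--     for i in range(K, N):
--         current_score += S[i] - S[i - K]  # Slide the window
--         max_score = max(max_score, current_score)
--
--     return max_score
-- ===== SOURCE B (Python) =====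
-- def max_score_subarray(N, K, A):
--     # Prefix sums of the index-weighted array: P[j] = sum of (t+1)*A[t] for t < j.
--     n = max(N, 0)
--     P = [0]
--     for j in range(n):
--         P.append(P[-1] + (j + 1) * A[j])
--     best = P[min(K, n)]          # score of the first window, sum(S[:K])
--     for i in range(K, N):
--         best = max(best, P[i + 1] - P[i + 1 - K])
--     return best
-- ===== Notes on version B (the rewrite author's own statement) =====
-- stated objective: alternative
-- what changed: Replaces the incremental add/subtract sliding-window update with a precomputed prefix-sum table of the index-weighted array; each window's score is a constant-time difference P[i+1]-P[i+1-K], so no running current_score is maintained. Pre_ excludes negative window sizes K (A raises IndexError on them except the degenerate corner N<=K<0 where empty ranges make it return 0, and B's prefix-table lookup raises there too for K<=-2) and N greater than len(A), where A raises.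
-- outside the precondition, e.g. on max_score_subarray(-3, -2, []): A returns 0, B raises IndexError; on max_score_subarray(-1, -1, []): A returns 0, B returns 0; on max_score_subarray(2, -1, [1, 2]): A raises IndexError, B raises IndexError
import Mathlib
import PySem

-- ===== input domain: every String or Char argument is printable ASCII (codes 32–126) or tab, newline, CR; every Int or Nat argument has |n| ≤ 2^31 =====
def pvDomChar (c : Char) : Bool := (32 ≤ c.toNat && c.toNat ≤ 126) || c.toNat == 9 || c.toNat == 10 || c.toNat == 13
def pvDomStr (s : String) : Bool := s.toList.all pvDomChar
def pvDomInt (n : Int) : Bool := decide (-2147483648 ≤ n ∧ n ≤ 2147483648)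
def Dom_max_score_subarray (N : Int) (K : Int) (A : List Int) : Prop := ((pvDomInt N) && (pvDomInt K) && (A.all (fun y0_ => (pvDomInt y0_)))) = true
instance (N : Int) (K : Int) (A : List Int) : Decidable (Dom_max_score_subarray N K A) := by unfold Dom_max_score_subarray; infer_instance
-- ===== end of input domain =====

-- B replaces A's incremental sliding-window update with a prefix-sum table; same O(n) cost, different decomposition.

-- ===== PORT A =====
def max_score_subarray (N : Int) (K : Int) (A : List Int) : Int :=
  let S := (PySem.List.pyRange 0 N 1).map (fun i => (i + 1) * PySem.List.pyGetD A i 0)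
  let first := (PySem.List.slice S none (some K)).sum
  let st := (PySem.List.pyRange K N 1).foldl
    (fun (st : Int × Int) i =>
      let cur := st.2 + PySem.List.pyGetD S i 0 - PySem.List.pyGetD S (i - K) 0
      (max st.1 cur, cur)) (first, first)
  st.1

-- ===== PORT B =====
def max_score_subarray_alt (N : Int) (K : Int) (A : List Int) : Int :=
  let n := max N 0
  let P := (PySem.List.pyRange 0 n 1).foldl
    (fun P j => P ++ [PySem.List.pyGetD P (-1) 0 + (j + 1) * PySem.List.pyGetD A j 0]) [(0 : Int)]
  let best := PySem.List.pyGetD P (min K n) 0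
  (PySem.List.pyRange K N 1).foldl
    (fun best i => max best (PySem.List.pyGetD P (i + 1) 0 - PySem.List.pyGetD P (i + 1 - K) 0)) best

-- ===== PRECONDITION & SPEC =====
-- Pre_ excludes negative window sizes K (the Python A raises IndexError on them, except the
-- degenerate corner N ≤ K < 0 where empty ranges make it return 0, and B raises there too
-- for K ≤ -2) and N > len(A), where A raises IndexError building the score array.
def Pre_max_score_subarray (N : Int) (K : Int) (A : List Int) : Prop :=
  0 ≤ K ∧ N ≤ (A.length : Int)
instance (N : Int) (K : Int) (A : List Int) : Decidable (Pre_max_score_subarray N K A) := by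
  unfold Pre_max_score_subarray; infer_instance
def pvWitness_max_score_subarray : Int × Int × List Int := (3, 2, [1, -2, 3])

def Spec_max_score_subarray (N : Int) (K : Int) (A : List Int) (out : Int) : Prop := out = max_score_subarray_alt N K A
instance (N : Int) (K : Int) (A : List Int) (out : Int) : Decidable (Spec_max_score_subarray N K A out) := by unfold Spec_max_score_subarray; infer_instance

-- ===== CLAIM (what is proved, stated in full; the proofs are below) =====
def Claim_equal_max_score_subarray : Prop := ∀ (N : Int) (K : Int) (A : List Int), Dom_max_score_subarray N K A → Pre_max_score_subarray N K A → Spec_max_score_subarray N K A (max_score_subarray N K A)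

-- ===== LEMMAS AND PROOFS =====

-- prefix sums of the index-weighted array: pf A j = Σ_{t<j} (t+1)*A[t]
def pf (A : List Int) : Nat → Int
  | 0 => 0
  | j + 1 => pf A j + ((j : Int) + 1) * PySem.List.pyGetD A (j : Int) 0

-- B's prefix table is pf mapped over range (n+1)
lemma buildP_eq (A : List Int) (n : Nat) :
    (PySem.List.pyRange 0 (n : Int) 1).foldl
      (fun P j => P ++ [PySem.List.pyGetD P (-1) 0 + (j + 1) * PySem.List.pyGetD A j 0]) [(0 : Int)]
    = (List.range (n + 1)).map (pf A) := by
  induction n with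
  | zero => simp [List.range_succ, pf]
  | succ m ih =>
    have h1 : ((m : Int) + 1) = (((m + 1 : Nat)) : Int) := by push_cast; ring
    have h2 : PySem.List.pyRange 0 ((m + 1 : Nat) : Int) 1
        = PySem.List.pyRange 0 (m : Int) 1 ++ [(m : Int)] := by
      rw [← h1, PySem.List.pyRange_one_succ_right (by positivity)]
    rw [h2, List.foldl_append, ih]
    have h3 : (List.range (m + 1)).map (pf A) = (List.range m).map (pf A) ++ [pf A m] := by
      simp [List.range_succ]
    rw [h3]
    simp only [List.foldl_cons, List.foldl_nil, PySem.List.pyGetD_neg_one_append_singleton]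
    rw [List.range_succ (n := m + 1), List.map_append, h3]
    simp [pf]

-- telescoping sums of pf
lemma sum_pf (A : List Int) (n : Nat) :
    (((List.range n).map (fun j => pf A (j + 1) - pf A j))).sum = pf A n := by
  induction n with
  | zero => simp [pf]
  | succ m ih => rw [List.range_succ, List.map_append, List.sum_append, ih]; simp [pf]

lemma sum_take_pf (A : List Int) (k n : Nat) :
    (((List.range n).map (fun j => pf A (j + 1) - pf A j)).take k).sum = pf A (min k n) := by
  induction n with
  | zero => simp [pf]
  | succ m ih =>
    rw [List.range_succ, List.map_append]
    by_cases h : k ≤ m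
    · rw [List.take_append_of_le_length (by simpa using h), ih]
      rw [min_eq_left h, min_eq_left (Nat.le_succ_of_le h)]
    · have hk : m + 1 ≤ k := by omega
      rw [List.take_of_length_le (by simpa using hk)]
      rw [List.sum_append, sum_pf, min_eq_right (by omega : m + 1 ≤ k)]
      simp [pf]

-- indexing into the prefix table
lemma P_get (A : List Int) (n : Nat) (j : Int) (h0 : 0 ≤ j) (h1 : j ≤ (n : Int)) :
    PySem.List.pyGetD ((List.range (n + 1)).map (pf A)) j 0 = pf A j.toNat := by
  have hj : ((j.toNat : Nat) : Int) = j := Int.toNat_of_nonneg h0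
  rw [← hj, PySem.List.pyGetD_natCast]
  have hlt : j.toNat < n + 1 := by omega
  simp [List.getD_eq_getElem?_getD, hlt]
  congr 1; omega

-- indexing into A's score array S
lemma S_get (A : List Int) (N i : Int) (h0 : 0 ≤ i) (h1 : i < N) :
    PySem.List.pyGetD ((PySem.List.pyRange 0 N 1).map (fun i => (i + 1) * PySem.List.pyGetD A i 0)) i 0
    = pf A (i + 1).toNat - pf A i.toNat := by
  rw [PySem.List.pyGetD_map_pyRange_of_nonneg _ _ _ _ h0 h1]
  have h2 : (i + 1).toNat = i.toNat + 1 := by omega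
  have h3 : ((i.toNat : Nat) : Int) = i := Int.toNat_of_nonneg h0
  rw [h2]; simp [pf, h3]

-- the first window's score
lemma S_sum (A : List Int) (N K : Int) :
    (((PySem.List.pyRange 0 N 1).map (fun i => (i + 1) * PySem.List.pyGetD A i 0)).take K.toNat).sum
    = pf A (min K.toNat N.toNat) := by
  rw [PySem.List.pyRange_one, List.map_map]
  have hc : ((fun i => (i + 1) * PySem.List.pyGetD A i 0) ∘ fun k : Nat => (0 : Int) + k)
      = fun k : Nat => pf A (k + 1) - pf A k := by
    funext k; simp [Function.comp, pf]
  rw [hc, sum_take_pf]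
  congr 1; omega

-- the sliding loop of A computes the same maximum as B's prefix-difference loop
lemma loop_eq (A : List Int) (N K : Int) :
    ∀ (fuel : Nat) (lo m : Int), (N - lo).toNat = fuel → K ≤ lo → 0 ≤ lo →
    ((PySem.List.pyRange lo N 1).foldl
      (fun (st : Int × Int) i =>
        let cur := st.2 + (pf A (i + 1).toNat - pf A i.toNat) - (pf A (i - K + 1).toNat - pf A (i - K).toNat)
        (max st.1 cur, cur)) (m, pf A lo.toNat - pf A (lo - K).toNat)).1
    = (PySem.List.pyRange lo N 1).foldl
        (fun best i => max best (pf A (i + 1).toNat - pf A (i + 1 - K).toNat)) m := by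
  intro fuel
  induction fuel with
  | zero =>
    intro lo m hf _ _
    rw [PySem.List.pyRange_one_eq_nil (by omega)]
    simp
  | succ f ih =>
    intro lo m hf hKlo hlo
    by_cases hNlo : N ≤ lo
    · rw [PySem.List.pyRange_one_eq_nil (by omega)]; simp
    · have hloN : lo < N := by omega
      rw [PySem.List.pyRange_one_cons hloN]
      simp only [List.foldl_cons]
      have hcur : pf A lo.toNat - pf A (lo - K).toNat + (pf A (lo + 1).toNat - pf A lo.toNat)
          - (pf A (lo - K + 1).toNat - pf A (lo - K).toNat)
          = pf A (lo + 1).toNat - pf A (lo + 1 - K).toNat := by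
        have h : lo - K + 1 = lo + 1 - K := by ring
        rw [h]; ring
      rw [hcur]
      have := ih (lo + 1) (max m (pf A (lo + 1).toNat - pf A (lo + 1 - K).toNat))
        (by omega) (by omega) (by omega)
      rw [← this]

lemma main_eq (N K : Int) (A : List Int) (hK : 0 ≤ K) :
    max_score_subarray N K A = max_score_subarray_alt N K A := by
  unfold max_score_subarray max_score_subarray_alt
  simp only []
  rw [PySem.List.slice_to _ hK]
  have hmax : max N 0 = ((N.toNat : Nat) : Int) := (Int.ofNat_toNat N).symm
  rw [hmax, buildP_eq]
  rw [S_sum A N K]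
  -- rewrite B's fold body via P_get
  have hB : (PySem.List.pyRange K N 1).foldl
      (fun best i => max best (PySem.List.pyGetD ((List.range (N.toNat + 1)).map (pf A)) (i + 1) 0
        - PySem.List.pyGetD ((List.range (N.toNat + 1)).map (pf A)) (i + 1 - K) 0))
      (PySem.List.pyGetD ((List.range (N.toNat + 1)).map (pf A)) (min K ((N.toNat : Nat) : Int)) 0)
    = (PySem.List.pyRange K N 1).foldl
        (fun best i => max best (pf A (i + 1).toNat - pf A (i + 1 - K).toNat))
        (pf A (min K.toNat N.toNat)) := by
    have hinit : PySem.List.pyGetD ((List.range (N.toNat + 1)).map (pf A)) (min K ((N.toNat : Nat) : Int)) 0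
        = pf A (min K.toNat N.toNat) := by
      rw [P_get A N.toNat _ (by omega) (by omega)]
      congr 1; omega
    rw [hinit]
    apply PySem.List.foldl_congr_mem
    intro acc x hx
    rw [PySem.List.mem_pyRange_one] at hx
    rw [P_get A N.toNat _ (by omega) (by omega), P_get A N.toNat _ (by omega) (by omega)]
  rw [hB]
  -- rewrite A's fold body via S_get
  have hA : (PySem.List.pyRange K N 1).foldl
      (fun (st : Int × Int) i =>
        let cur := st.2 + PySem.List.pyGetD ((PySem.List.pyRange 0 N 1).map (fun i => (i + 1) * PySem.List.pyGetD A i 0)) i 0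
          - PySem.List.pyGetD ((PySem.List.pyRange 0 N 1).map (fun i => (i + 1) * PySem.List.pyGetD A i 0)) (i - K) 0
        (max st.1 cur, cur)) (pf A (min K.toNat N.toNat), pf A (min K.toNat N.toNat))
    = (PySem.List.pyRange K N 1).foldl
      (fun (st : Int × Int) i =>
        let cur := st.2 + (pf A (i + 1).toNat - pf A i.toNat) - (pf A (i - K + 1).toNat - pf A (i - K).toNat)
        (max st.1 cur, cur)) (pf A (min K.toNat N.toNat), pf A (min K.toNat N.toNat)) := by
    apply PySem.List.foldl_congr_mem
    intro acc x hx
    rw [PySem.List.mem_pyRange_one] at hx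
    rw [S_get A N x (by omega) (by omega), S_get A N (x - K) (by omega) (by omega)]
  rw [hA]
  by_cases hNK : N ≤ K
  · rw [PySem.List.pyRange_one_eq_nil hNK]; simp
  · have hKN : K < N := by omega
    have hmin : min K.toNat N.toNat = K.toNat := by omega
    have hinit : pf A (min K.toNat N.toNat) = pf A K.toNat - pf A (K - K).toNat := by
      rw [hmin]
      have : (K - K).toNat = 0 := by omega
      rw [this]; simp [pf]
    rw [hinit] at *
    rw [loop_eq A N K (N - K).toNat K _ rfl le_rfl hK]

-- ===== VERDICT (by name: the statement is the Claim_ definition above) =====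
theorem max_score_subarray_spec : Claim_equal_max_score_subarray := by
  intro N K A _ hPre
  exact main_eq N K A hPre.1
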